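-- pv_equiv track=rewrite | github.com/Animiral/reels | reels.py | make_overmat
-- ===== SOURCE A (Python) =====
-- def is_subsequence(haystack, needle):
-- 	'''Return True if the list of symbols in needle also occurs in the haystack (also a list of symbols).
-- 	This is the most naive, but also concise implementation. It only runs in setup() on generally short lists.'''
-- 	for i in range(len(haystack) - len(needle) + 1):
-- 		for j in range(len(needle)):
-- 			if haystack[i+j] != needle[j]:
-- 				break
-- 		else:
-- 			return True
-- 	else:
-- 		return False
--
-- def overlap(left, right):
-- 	'''Return the number of overlapping symbols when appending the right piece to the left piece.'''
-- 	max_overlap = min(len(left),len(right)) - 1 # legal pieces can not overlap whole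
--
-- 	for i in range(max_overlap, 0, -1):
-- 		if left[-i:] == right[:i]:
-- 			return i
-- 	else:
-- 		return 0
--
-- def make_overmat(obs):
-- 	'''Construct the overlap matrix from the list of observations.
--
-- 	The overlap matrix is an NxN array of arrays such that overmat[i][j] is the maximum number of symbols
-- 	that can be overlapped when appending obs[j] to the right of obs[i].
--
-- 	As a byproduct, this function notes a set of obs pieces which are substrings of some other piece and
-- 	thus redundant. The members of the elim set are indices into obs.
--
-- 	The return value of make_overmat is (overmat, elim).
-- 	'''
-- 	N = len(obs)
-- 	elim = set() # redundant pieces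
--
-- 	overmat = [[None] * N for i in range(0,N)] # overlap matrix
--
-- 	for i in range(0,N):
-- 		for j in range(0,N):
-- 			if (i != j) and is_subsequence(obs[j], obs[i]):
-- 				elim.add(i) # mark redundant piece if we find any
-- 				break
-- 			else:
-- 				overmat[i][j] = overlap(obs[i], obs[j])
--
-- 	return overmat, elim
-- ===== SOURCE B (Python) =====
-- def _step(k, c, p, pi):
-- 	'''Advance KMP automaton state k of pattern p (with prefix function pi) on symbol c.'''
-- 	while k > 0 and (k == len(p) or c != p[k]):
-- 		k = pi[k - 1]
-- 	if k < len(p) and c == p[k]: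
-- 		k += 1
-- 	return k
--
-- def _prefix_function(p):
-- 	'''pi[q] = length of the longest proper border of p[:q+1].'''
-- 	pi = [0] * len(p)
-- 	k = 0
-- 	for q in range(1, len(p)):
-- 		k = _step(k, p[q], p, pi)
-- 		pi[q] = k
-- 	return pi
--
-- def _contains(text, p, pi):
-- 	'''True if p occurs as a contiguous run inside text (KMP search).'''
-- 	if not p:
-- 		return True
-- 	k = 0
-- 	for c in text:
-- 		k = _step(k, c, p, pi)
-- 		if k == len(p):
-- 			return True
-- 	return False
--
-- def _max_overlap(left, right, pi_right):
-- 	'''Longest k < min(len(left), len(right)) with left[-k:] == right[:k], via the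
-- 	final KMP automaton state (longest prefix of right that is a suffix of left),
-- 	lowered along the border chain until it fits the cap.'''
-- 	k = 0
-- 	for c in left:
-- 		k = _step(k, c, right, pi_right)
-- 	cap = min(len(left), len(right)) - 1
-- 	while k > cap and k > 0:
-- 		k = pi_right[k - 1]
-- 	return k
--
-- def make_overmat(obs):
-- 	'''Construct the overlap matrix and the set of redundant piece indices.
--
-- 	overmat[i][j] is the maximum overlap when appending obs[j] after obs[i]; a piece i
-- 	that occurs inside another piece is redundant: it goes into elim and the rest of
-- 	its row is left as None (cells past the point where redundancy was detected are
-- 	never computed).  Substring tests and overlaps both run on KMP prefix functions,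
-- 	computed once per piece.
-- 	'''
-- 	N = len(obs)
-- 	pis = [_prefix_function(p) for p in obs]
-- 	overmat = []
-- 	elim = set()
-- 	for i in range(N):
-- 		row = [None] * N
-- 		for j in range(N):
-- 			if j != i and _contains(obs[j], obs[i], pis[i]):
-- 				elim.add(i)
-- 				break
-- 			row[j] = _max_overlap(obs[i], obs[j], pis[j])
-- 		overmat.append(row)
-- 	return overmat, elim
-- ===== Notes on version B (the rewrite author's own statement) =====
-- stated objective: faster
-- what changed: B replaces the naive per-pair substring scan and the descending suffix/prefix slice scan with KMP: each piece's prefix function is computed once, substring redundancy is detected by running the KMP automaton over the other piece, and each overlap is the automaton's final state lowered along the border chain to the legal cap.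
import Mathlib
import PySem

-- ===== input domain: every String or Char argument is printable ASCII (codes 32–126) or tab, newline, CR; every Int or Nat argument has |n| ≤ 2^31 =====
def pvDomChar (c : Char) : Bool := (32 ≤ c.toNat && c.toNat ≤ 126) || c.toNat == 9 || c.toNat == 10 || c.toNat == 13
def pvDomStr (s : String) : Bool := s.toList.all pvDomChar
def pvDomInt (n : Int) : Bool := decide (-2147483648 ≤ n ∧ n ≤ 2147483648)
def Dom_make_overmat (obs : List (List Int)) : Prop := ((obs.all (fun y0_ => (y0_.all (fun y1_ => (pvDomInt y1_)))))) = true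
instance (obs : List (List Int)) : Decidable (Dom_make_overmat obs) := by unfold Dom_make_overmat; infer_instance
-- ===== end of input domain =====

-- B replaces A's naive per-pair substring/overlap scans by KMP: one prefix function per
-- piece, substring redundancy by running the automaton, overlap = final automaton state
-- lowered along the border chain to the cap (objective: faster).

-- ===== PORT A =====
-- for j in range(len(needle)): if haystack[i+j] != needle[j]: break / else: return True
def pvInnerA (h n : List Int) (i : Int) : Bool :=
  (PySem.List.pyRange 0 (n.length : Int) 1).all
    (fun j => PySem.List.pyGet? h (i + j) == PySem.List.pyGet? n j)

def is_subsequence (h n : List Int) : Bool :=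
  (PySem.List.pyRange 0 ((h.length : Int) - (n.length : Int) + 1) 1).any (fun i => pvInnerA h n i)

def overlap (l r : List Int) : Int :=
  let m : Int := min (l.length : Int) (r.length : Int) - 1
  match (PySem.List.pyRange m 0 (-1)).find?
      (fun i => PySem.List.slice l (some (-i)) none == PySem.List.slice r none (some i)) with
  | some i => i
  | none => 0

-- inner j-loop of A: builds the row left-to-right; on break the remaining cells stay None
def pvRowA (obs : List (List Int)) (oi : List Int) (i : Int) : List Int → List (Option Int) × Bool
  | [] => ([], false)
  | j :: js =>
    let oj := (PySem.List.pyGet? obs j).getD []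
    if (i != j) && is_subsequence oj oi then
      (List.replicate (js.length + 1) none, true)
    else
      let rest := pvRowA obs oi i js
      (some (overlap oi oj) :: rest.1, rest.2)

def make_overmat (obs : List (List Int)) : List (List (Option Int)) × List Int :=
  let N : Int := obs.length
  (PySem.List.pyRange 0 N 1).foldl
    (fun (st : List (List (Option Int)) × PySem.Set Int) i =>
      let oi := (PySem.List.pyGet? obs i).getD []
      let rb := pvRowA obs oi i (PySem.List.pyRange 0 N 1)
      (st.1 ++ [rb.1], if rb.2 then PySem.Set.add st.2 i else st.2))
    ([], [])

-- ===== PORT B =====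
-- the while-loop of _step; the fallback k := pi[k-1] strictly decreases k (pi[q] ≤ q),
-- so a fuel of the entering state k bounds the iterations; all pi/p indices read are in
-- range in every use, so plain List.getD is exact for the Python indexing here
def pvStepGo (p : List Int) (pi : List Nat) (c : Int) : Nat → Nat → Nat
  | 0, k => k
  | fuel + 1, k =>
    if k ≠ 0 ∧ (k = p.length ∨ c ≠ p.getD k 0) then pvStepGo p pi c fuel (pi.getD (k - 1) 0)
    else k

def pvStep (p : List Int) (pi : List Nat) (c : Int) (k : Nat) : Nat :=
  let k' := pvStepGo p pi c k k
  if k' < p.length ∧ c = p.getD k' 0 then k' + 1 else k'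

-- _prefix_function: pi = [0]*len(p); for q in range(1, len(p)): k = _step(...); pi[q] = k
def pvPrefixFn (p : List Int) : List Nat :=
  ((PySem.List.pyRange 1 (p.length : Int) 1).foldl
    (fun (st : List Nat × Nat) q =>
      let k := pvStep p st.1 (p.getD q.toNat 0) st.2
      (st.1.set q.toNat k, k))
    (List.replicate p.length 0, 0)).1

-- _contains: run the automaton over text, early True when the full pattern is matched
def pvContainsGo (p : List Int) (pi : List Nat) : Nat → List Int → Bool
  | _, [] => false
  | k, c :: rest =>
    let k' := pvStep p pi c k
    if k' = p.length then true else pvContainsGo p pi k' rest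

def pvContains (text p : List Int) (pi : List Nat) : Bool :=
  if p.isEmpty then true else pvContainsGo p pi 0 text

-- the cap-lowering while-loop of _max_overlap (fuel = entering k, as in pvStepGo)
def pvCapGo (pi : List Nat) (cap : Int) : Nat → Nat → Nat
  | 0, k => k
  | fuel + 1, k =>
    if (k : Int) > cap ∧ k ≠ 0 then pvCapGo pi cap fuel (pi.getD (k - 1) 0) else k

def pvKmpOverlap (l r : List Int) (pi : List Nat) : Nat :=
  let k := l.foldl (fun k c => pvStep r pi c k) 0
  let cap : Int := min (l.length : Int) (r.length : Int) - 1
  pvCapGo pi cap k k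

-- inner j-loop of B: same early-break row shape as the Python, KMP primitives inside
def pvRowB (obs : List (List Int)) (pis : List (List Nat)) (oi : List Int) (pii : List Nat)
    (i : Int) : List Int → List (Option Int) × Bool
  | [] => ([], false)
  | j :: js =>
    let oj := (PySem.List.pyGet? obs j).getD []
    if (j != i) && pvContains oj oi pii then
      (List.replicate (js.length + 1) none, true)
    else
      let rest := pvRowB obs pis oi pii i js
      (some ((pvKmpOverlap oi oj ((PySem.List.pyGet? pis j).getD [])) : Int) :: rest.1, rest.2)

def make_overmat_alt (obs : List (List Int)) : List (List (Option Int)) × List Int :=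
  let N : Int := obs.length
  let pis := obs.map pvPrefixFn
  (PySem.List.pyRange 0 N 1).foldl
    (fun (st : List (List (Option Int)) × PySem.Set Int) i =>
      let oi := (PySem.List.pyGet? obs i).getD []
      let pii := (PySem.List.pyGet? pis i).getD []
      let rb := pvRowB obs pis oi pii i (PySem.List.pyRange 0 N 1)
      (st.1 ++ [rb.1], if rb.2 then PySem.Set.add st.2 i else st.2))
    ([], [])

-- ===== PRECONDITION & SPEC =====
def Spec_make_overmat (obs : List (List Int)) (out : List (List (Option Int)) × List Int) : Prop := out = make_overmat_alt obs
instance (obs : List (List Int)) (out : List (List (Option Int)) × List Int) : Decidable (Spec_make_overmat obs out) := by unfold Spec_make_overmat; infer_instance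

-- ===== CLAIM (what is proved, stated in full; the proofs are below) =====
def Claim_equal_make_overmat : Prop := ∀ (obs : List (List Int)), Dom_make_overmat obs → Spec_make_overmat obs (make_overmat obs)

-- ===== LEMMAS AND PROOFS =====

-- k is a border state of pattern p against text t: p.take k is a suffix of t
def PvBrd (p t : List Int) (k : Nat) : Prop := k ≤ p.length ∧ p.take k <:+ t
-- k is the LONGEST such state
def PvMaxB (p t : List Int) (k : Nat) : Prop := PvBrd p t k ∧ ∀ j, PvBrd p t j → j ≤ k
-- pi is a correct prefix function (longest proper border, with maximality) below index Q
def PvGoodUpto (p : List Int) (pi : List Nat) (Q : Nat) : Prop :=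
  ∀ q, q < Q → pi.getD q 0 ≤ q ∧ p.take (pi.getD q 0) <:+ p.take (q + 1) ∧
    ∀ j, j ≤ q → p.take j <:+ p.take (q + 1) → j ≤ pi.getD q 0
def PvGoodPi (p : List Int) (pi : List Nat) : Prop := PvGoodUpto p pi p.length

theorem pv_suffix_snoc_iff {xs t : List Int} {a c : Int} :
    xs ++ [a] <:+ t ++ [c] ↔ a = c ∧ xs <:+ t := by
  constructor
  · rintro ⟨u, hu⟩
    rw [← List.append_assoc] at hu
    obtain ⟨h1, h2⟩ := List.append_inj' hu (by simp)
    simp at h2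
    exact ⟨h2, u, h1⟩
  · rintro ⟨rfl, u, rfl⟩
    exact ⟨u, by simp⟩

theorem pv_take_suffix_snoc {p t : List Int} {c : Int} {j : Nat} (h1 : 1 ≤ j) (hj : j ≤ p.length) :
    (p.take j <:+ t ++ [c]) ↔ p.getD (j - 1) 0 = c ∧ p.take (j - 1) <:+ t := by
  have hlt : j - 1 < p.length := by omega
  have htake : p.take j = p.take (j - 1) ++ [p.getD (j - 1) 0] := by
    conv_lhs => rw [show j = (j - 1) + 1 by omega, List.take_add_one]
    rw [List.getElem?_eq_getElem hlt, List.getD_eq_getElem p 0 hlt]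
    rfl
  rw [htake, pv_suffix_snoc_iff]

theorem pv_suffix_of_suffix {p t : List Int} {a b : Nat} (hb : b ≤ p.length)
    (hab : a ≤ b) (hsa : p.take a <:+ t) (hsb : p.take b <:+ t) : p.take a <:+ p.take b :=
  List.suffix_of_suffix_length_le hsa hsb (by simp; omega)

theorem pv_stepGo_spec (p : List Int) (pi : List Nat) (c : Int) (t : List Int) (M : Nat)
    (hgood : PvGoodUpto p pi M) :
    ∀ fuel m, m ≤ fuel → m ≤ M → m ≤ p.length → p.take m <:+ t →
    ∃ m', pvStepGo p pi c fuel m = m' ∧ m' ≤ m ∧ m' ≤ p.length ∧ p.take m' <:+ t ∧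
      (m' = 0 ∨ (m' < p.length ∧ p.getD m' 0 = c)) ∧
      (∀ b, b ≤ m → b < p.length → p.getD b 0 = c → p.take b <:+ t → b ≤ m') := by
  intro fuel
  induction fuel with
  | zero =>
    intro m hf _ _ hsuf
    have hm0 : m = 0 := by omega
    subst hm0
    exact ⟨0, rfl, le_refl _, by omega, hsuf, Or.inl rfl, fun b hb _ _ _ => by omega⟩
  | succ fuel ih =>
    intro m hf hM hN hsuf
    by_cases hc : m ≠ 0 ∧ (m = p.length ∨ c ≠ p.getD m 0)
    · -- continue: fall back to pi[m-1]
      obtain ⟨hgd1, hgd2, hgd3⟩ := hgood (m - 1) (by omega)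
      set m2 := pi.getD (m - 1) 0 with hm2
      have hm2le : m2 ≤ m - 1 := hgd1
      have hm1le : m - 1 + 1 = m := by omega
      rw [hm1le] at hgd2 hgd3
      have hsuf2 : p.take m2 <:+ t := hgd2.trans hsuf
      obtain ⟨m', heq, hle, hlen, hs, hexit, hmax⟩ :=
        ih m2 (by omega) (by omega) (by omega) hsuf2
      refine ⟨m', ?_, by omega, hlen, hs, hexit, ?_⟩
      · rw [pvStepGo, if_pos hc]; exact heq
      · intro b hb hbN hbc hbs
        have hbm : b ≠ m := by
          rintro rfl
          rcases hc.2 with h | h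
          · omega
          · exact h hbc.symm
        have hb2 : b ≤ m2 := hgd3 b (by omega)
          (pv_suffix_of_suffix hN (by omega) hbs hsuf)
        exact hmax b hb2 hbN hbc hbs
    · -- exit
      refine ⟨m, by rw [pvStepGo, if_neg hc], le_refl _, hN, hsuf, ?_, fun b hb _ _ _ => hb⟩
      push_neg at hc
      by_cases hm : m = 0
      · exact Or.inl hm
      · have := hc hm
        refine Or.inr ⟨by omega, by tauto⟩

theorem pv_step_spec (p : List Int) (pi : List Nat) (c : Int) (t : List Int) (M : Nat)
    (hgood : PvGoodUpto p pi M) (m : Nat) (hmM : m ≤ M) (hmN : m ≤ p.length)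
    (hsuf : p.take m <:+ t) :
    pvStep p pi c m ≤ m + 1 ∧ pvStep p pi c m ≤ p.length ∧
    p.take (pvStep p pi c m) <:+ t ++ [c] ∧
    (∀ j, 1 ≤ j → j ≤ p.length → j - 1 ≤ m → p.take j <:+ t ++ [c] → j ≤ pvStep p pi c m) := by
  obtain ⟨m', heq, hle, hlen, hs, hexit, hmax⟩ :=
    pv_stepGo_spec p pi c t M hgood m m (le_refl m) hmM hmN hsuf
  unfold pvStep
  rw [heq]
  by_cases hif : m' < p.length ∧ c = p.getD m' 0
  · rw [if_pos hif]
    refine ⟨by omega, by omega, ?_, ?_⟩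
    · rw [pv_take_suffix_snoc (by omega) (by omega)]
      simpa using ⟨hif.2.symm, hs⟩
    · intro j hj1 hjN hjm hjs
      rw [pv_take_suffix_snoc hj1 hjN] at hjs
      have := hmax (j - 1) hjm (by omega) hjs.1 hjs.2
      omega
  · rw [if_neg hif]
    have hm0 : m' = 0 := by
      rcases hexit with h | h
      · exact h
      · exact absurd ⟨h.1, h.2.symm⟩ hif
    subst hm0
    refine ⟨by omega, by omega, ⟨t ++ [c], by simp⟩, ?_⟩
    intro j hj1 hjN hjm hjs
    rw [pv_take_suffix_snoc hj1 hjN] at hjs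
    exfalso
    have hb := hmax (j - 1) hjm (by omega) hjs.1 hjs.2
    have hj0 : j - 1 = 0 := by omega
    rw [hj0] at hjs
    exact hif ⟨by omega, hjs.1.symm⟩

theorem pv_take_succ {p : List Int} {m : Nat} (hm : m < p.length) :
    p.take (m + 1) = p.take m ++ [p.getD m 0] := by
  conv_lhs => rw [List.take_add_one]
  rw [List.getElem?_eq_getElem hm, List.getD_eq_getElem p 0 hm]
  rfl

def PvPfx (p : List Int) (q : Nat) (st : List Nat × Nat) : Prop :=
  st.1.length = p.length ∧ PvGoodUpto p st.1 q ∧ st.2 ≤ q - 1 ∧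
  p.take st.2 <:+ p.take q ∧ (∀ j, j ≤ q - 1 → p.take j <:+ p.take q → j ≤ st.2)

theorem pv_getD_set_ne (l : List Nat) (m q k : Nat) (h : m ≠ q) :
    (l.set m k).getD q 0 = l.getD q 0 := by
  simp [List.getD, List.getElem?_set_ne h]

theorem pv_pfx_loop (p : List Int) :
    ∀ m : Nat, 1 ≤ m → m ≤ p.length →
    PvPfx p m ((PySem.List.pyRange 1 (m : Int) 1).foldl
      (fun (st : List Nat × Nat) q =>
        let k := pvStep p st.1 (p.getD q.toNat 0) st.2
        (st.1.set q.toNat k, k))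
      (List.replicate p.length 0, 0)) := by
  intro m
  induction m with
  | zero => omega
  | succ m ih =>
    intro _ hmN
    by_cases hm1 : m = 0
    · subst hm1
      rw [show ((0 + 1 : Nat) : Int) = 1 by simp, PySem.List.pyRange_one_eq_nil (le_refl 1)]
      simp only [List.foldl_nil]
      have h0 : 0 < p.length := by omega
      refine ⟨by simp, ?_, by exact Nat.le_refl _, by simp, fun j hj _ => by omega⟩
      intro q hq
      have hq0 : q = 0 := by omega
      subst hq0
      have hrep : (List.replicate p.length (0 : Nat)).getD 0 0 = 0 := by
        simp [List.getD_eq_getElem?_getD, List.getElem?_replicate, h0]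
      simp only [hrep]
      exact ⟨le_refl 0, by simp, fun j hj _ => by omega⟩
    · have hind := ih (by omega) (by omega)
      rw [show ((m + 1 : Nat) : Int) = (m : Int) + 1 by push_cast; ring,
        PySem.List.pyRange_one_succ_right (by exact_mod_cast Nat.one_le_iff_ne_zero.mpr hm1),
        List.foldl_append]
      set st := ((PySem.List.pyRange 1 (m : Int) 1).foldl
        (fun (st : List Nat × Nat) q =>
          let k := pvStep p st.1 (p.getD q.toNat 0) st.2
          (st.1.set q.toNat k, k))
        (List.replicate p.length 0, 0)) with hst
      obtain ⟨hlen, hgood, hk1, hk2, hk3⟩ := hind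
      have hmlt : m < p.length := by omega
      simp only [List.foldl_cons, List.foldl_nil, Int.toNat_natCast]
      set c := p.getD m 0 with hc
      have hsucc : p.take (m + 1) = p.take m ++ [c] := pv_take_succ hmlt
      obtain ⟨hs1, hs2, hs3, hs4⟩ :=
        pv_step_spec p st.1 c (p.take m) m hgood st.2 (by omega) (by omega) hk2
      set k' := pvStep p st.1 c st.2 with hk'
      have hmaxq : ∀ j, j ≤ m → p.take j <:+ p.take (m + 1) → j ≤ k' := by
        intro j hj hjs
        by_cases hj0 : j = 0
        · omega
        · have hjN : j ≤ p.length := by omega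
          rw [hsucc] at hjs
          have hdec := (pv_take_suffix_snoc (by omega) hjN).mp hjs
          have hjm : j - 1 ≤ st.2 := hk3 (j - 1) (by omega) hdec.2
          exact hs4 j (by omega) hjN hjm hjs
      refine ⟨by simp [hlen], ?_, by omega, by rw [hsucc]; exact hs3, ?_⟩
      · intro q hq
        by_cases hqm : q = m
        · subst hqm
          have hset : ((st.1.set q k').getD q 0) = k' := by
            simp [List.getD, List.getElem?_set_self (by omega : q < st.1.length)]
          rw [hset]
          exact ⟨by omega, by rw [← hsucc] at hs3; exact hs3, fun j hj hjs => hmaxq j hj hjs⟩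
        · rw [pv_getD_set_ne st.1 m q k' (fun h => hqm h.symm)]
          exact hgood q (by omega)
      · intro j hj hjs
        exact hmaxq j (by omega) hjs

theorem pv_goodPi_prefixFn (p : List Int) : PvGoodPi p (pvPrefixFn p) := by
  unfold pvPrefixFn PvGoodPi
  by_cases hN : p.length = 0
  · rw [hN]
    intro q hq
    omega
  · exact (pv_pfx_loop p p.length (by omega) (le_refl _)).2.1

theorem pv_take_eq_nil_len {p : List Int} {j : Nat} (hj : j ≤ p.length) (h : p.take j = []) :
    j = 0 := by
  have := congrArg List.length h
  simp only [List.length_take, List.length_nil] at this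
  omega

theorem pv_maxB_nil (p : List Int) : PvMaxB p [] 0 := by
  refine ⟨⟨Nat.zero_le _, by simp⟩, ?_⟩
  rintro j ⟨hj, hs⟩
  have := pv_take_eq_nil_len hj (List.suffix_nil.mp hs)
  omega

theorem pv_step_maxB (p : List Int) (pi : List Nat) (hgood : PvGoodPi p pi) (t : List Int)
    (c : Int) (k : Nat) (hk : PvMaxB p t k) : PvMaxB p (t ++ [c]) (pvStep p pi c k) := by
  obtain ⟨⟨hkN, hksuf⟩, hkmax⟩ := hk
  obtain ⟨hs1, hs2, hs3, hs4⟩ := pv_step_spec p pi c t p.length hgood k hkN hkN hksuf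
  refine ⟨⟨hs2, hs3⟩, ?_⟩
  rintro j ⟨hjN, hjs⟩
  by_cases hj0 : j = 0
  · omega
  · have hdec := (pv_take_suffix_snoc (by omega) hjN).mp hjs
    have hjm : j - 1 ≤ k := hkmax (j - 1) ⟨by omega, hdec.2⟩
    exact hs4 j (by omega) hjN hjm hjs

theorem pv_run_maxB (p : List Int) (pi : List Nat) (hgood : PvGoodPi p pi) (t : List Int) :
    PvMaxB p t (t.foldl (fun k c => pvStep p pi c k) 0) := by
  induction t using List.reverseRecOn with
  | nil => exact pv_maxB_nil p
  | append_singleton t c ih =>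
    rw [List.foldl_append, List.foldl_cons, List.foldl_nil]
    exact pv_step_maxB p pi hgood t c _ ih

theorem pv_containsGo_iff (p : List Int) (pi : List Nat) (hgood : PvGoodPi p pi) :
    ∀ rest t k, PvMaxB p t k → k < p.length →
    (pvContainsGo p pi k rest = true ↔ ∃ u v, rest = u ++ v ∧ u ≠ [] ∧ p <:+ t ++ u) := by
  intro rest
  induction rest with
  | nil =>
    intro t k _ _
    simp only [pvContainsGo]
    constructor
    · intro h; exact absurd h (by simp)
    · rintro ⟨u, v, huv, hu, _⟩
      exact absurd huv.symm (by simp [hu])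
  | cons c rest ih =>
    intro t k hk hklt
    have hstep := pv_step_maxB p pi hgood t c k hk
    set k' := pvStep p pi c k with hk'
    by_cases hfull : k' = p.length
    · constructor
      · intro _
        refine ⟨[c], rest, rfl, by simp, ?_⟩
        have := hstep.1.2
        rw [hfull, List.take_length] at this
        exact this
      · intro _
        simp only [pvContainsGo, ← hk', if_pos hfull]
    · have hk'le : k' ≤ p.length := hstep.1.1
      have hnot : p <:+ t ++ [c] → False := by
        intro hsuf
        have := hstep.2 p.length ⟨le_refl _, by rw [List.take_length]; exact hsuf⟩
        omega
      have hIH := ih (t ++ [c]) k' hstep (by omega)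
      simp only [pvContainsGo, ← hk', if_neg hfull]
      rw [hIH]
      constructor
      · rintro ⟨u, v, rfl, hu, hsuf⟩
        exact ⟨c :: u, v, rfl, by simp, by simpa using hsuf⟩
      · rintro ⟨u, v, huv, hu, hsuf⟩
        match u, hu with
        | cu :: u', _ =>
          have hc : cu = c ∧ u' ++ v = rest := by
            have h1 : cu = c := by
              have := congrArg (fun l => l.head?) huv
              simpa using this.symm
            refine ⟨h1, ?_⟩
            have := congrArg List.tail huv
            simpa using this.symm
          obtain ⟨rfl, rfl⟩ := hc
          by_cases hu' : u' = []
          · subst hu'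
            exact absurd hsuf hnot
          · exact ⟨u', v, rfl, hu', by simpa using hsuf⟩

theorem pv_contains_iff_infix (t p : List Int) (pi : List Nat) (hgood : PvGoodPi p pi) :
    pvContains t p pi = true ↔ p <:+: t := by
  unfold pvContains
  by_cases hp : p.isEmpty
  · rw [if_pos hp]
    have hp0 : p = [] := List.isEmpty_iff.mp hp
    subst hp0
    simp
  · rw [if_neg hp]
    have hlen : 0 < p.length := by
      cases p with
      | nil => simp at hp
      | cons a l => simp
    rw [pv_containsGo_iff p pi hgood t [] 0 (pv_maxB_nil p) hlen]
    constructor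
    · rintro ⟨u, v, rfl, hu, hsuf⟩
      simp only [List.nil_append] at hsuf
      exact hsuf.isInfix.trans ⟨[], v, by simp⟩
    · rintro ⟨s, e, rfl⟩
      refine ⟨s ++ p, e, by simp, ?_, by simp⟩
      intro h
      have hp2 := congrArg List.length h
      simp only [List.length_append, List.length_nil] at hp2
      omega

theorem pv_capGo_spec (p : List Int) (pi : List Nat) (hgood : PvGoodPi p pi) (cap : Int)
    (t : List Int) :
    ∀ fuel k, k ≤ fuel → PvBrd p t k →
    (∀ j, j ≤ p.length → p.take j <:+ t → (j : Int) ≤ cap → j ≤ k) →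
    ∃ r, pvCapGo pi cap fuel k = r ∧ PvBrd p t r ∧ ((r : Int) ≤ cap ∨ r = 0) ∧
      (∀ j, j ≤ p.length → p.take j <:+ t → (j : Int) ≤ cap → j ≤ r) := by
  intro fuel
  induction fuel with
  | zero =>
    intro k hf hb hmax
    have hk0 : k = 0 := by omega
    subst hk0
    exact ⟨0, rfl, hb, Or.inr rfl, hmax⟩
  | succ fuel ih =>
    intro k hf hb hmax
    by_cases hc : (k : Int) > cap ∧ k ≠ 0
    · have hkN : k ≤ p.length := hb.1
      have hk0 : k ≠ 0 := hc.2
      obtain ⟨hg1, hg2, hg3⟩ := hgood (k - 1) (by omega)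
      set k2 := pi.getD (k - 1) 0 with hk2
      have hk1 : k - 1 + 1 = k := by omega
      rw [hk1] at hg2 hg3
      have hb2 : PvBrd p t k2 := ⟨by omega, hg2.trans hb.2⟩
      have hmax2 : ∀ j, j ≤ p.length → p.take j <:+ t → (j : Int) ≤ cap → j ≤ k2 := by
        intro j hj hjs hjc
        have hjk : j ≤ k := hmax j hj hjs hjc
        have hjlt : j < k := by omega
        exact hg3 j (by omega) (pv_suffix_of_suffix hb.1 (by omega) hjs hb.2)
      obtain ⟨r, hre, hrb, hror, hrmax⟩ := ih k2 (by omega) hb2 hmax2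
      exact ⟨r, by rw [pvCapGo, if_pos hc]; exact hre, hrb, hror, hrmax⟩
    · refine ⟨k, by rw [pvCapGo, if_neg hc], hb, ?_, hmax⟩
      by_cases hk0 : k = 0
      · exact Or.inr hk0
      · left
        by_contra hgt
        exact hc ⟨by omega, hk0⟩

theorem pv_find_desc (l : List Int) (q : Int → Bool) (v : Int)
    (hpw : l.Pairwise (fun a b => b < a)) (hv : v ∈ l) (hq : q v = true)
    (hmax : ∀ x ∈ l, q x = true → x ≤ v) : l.find? q = some v := by
  induction l with
  | nil => simp at hv
  | cons x t ih =>
    rcases List.mem_cons.mp hv with rfl | hvt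
    · rw [List.find?_cons_of_pos hq]
    · have hxv : v < x := (List.pairwise_cons.mp hpw).1 v hvt
      have hqx : ¬ q x = true := by
        intro h
        have := hmax x (by simp) h
        omega
      rw [List.find?_cons_of_neg (by simpa using hqx)]
      exact ih (List.pairwise_cons.mp hpw).2 hvt
        (fun y hy h => hmax y (List.mem_cons_of_mem x hy) h)

theorem pv_range_desc_pairwise (m : Int) :
    (PySem.List.pyRange m 0 (-1)).Pairwise (fun a b => b < a) := by
  rw [PySem.List.pyRange_neg_one]
  refine List.Pairwise.map _ ?_ (List.pairwise_lt_range)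
  intro a b hab
  omega

theorem pv_mem_range_desc {m x : Int} (hx : x ∈ PySem.List.pyRange m 0 (-1)) :
    1 ≤ x ∧ x ≤ m := by
  rw [PySem.List.pyRange_neg_one] at hx
  simp only [List.mem_map, List.mem_range] at hx
  obtain ⟨k, hk, rfl⟩ := hx
  omega

theorem pv_range_desc_mem {m x : Int} (h1 : 1 ≤ x) (h2 : x ≤ m) :
    x ∈ PySem.List.pyRange m 0 (-1) := by
  rw [PySem.List.pyRange_neg_one]
  simp only [List.mem_map, List.mem_range]
  exact ⟨(m - x).toNat, by omega, by omega⟩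

theorem pv_cond_iff (l r : List Int) (a : Nat) (h1 : 1 ≤ a) (hl : a ≤ l.length)
    (hr : a ≤ r.length) :
    ((PySem.List.slice l (some (-(a : Int))) none == PySem.List.slice r none (some (a : Int)))
      = true) ↔ r.take a <:+ l := by
  rw [PySem.List.slice_from_neg_natCast l a (by omega), PySem.List.slice_to_natCast,
    beq_iff_eq, List.suffix_iff_eq_drop, List.length_take_of_le hr]
  exact ⟨fun h => h.symm, fun h => h.symm⟩

theorem pv_overlap_eq (l r : List Int) :
    overlap l r = ((pvKmpOverlap l r (pvPrefixFn r)) : Int) := by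
  have hgood := pv_goodPi_prefixFn r
  unfold overlap pvKmpOverlap
  dsimp only
  set m : Int := min (l.length : Int) (r.length : Int) - 1 with hm
  set k := l.foldl (fun k c => pvStep r (pvPrefixFn r) c k) 0 with hk
  have hrun : PvMaxB r l k := pv_run_maxB r (pvPrefixFn r) hgood l
  obtain ⟨rr, hre, hrb, hror, hrmax⟩ :=
    pv_capGo_spec r (pvPrefixFn r) hgood m l k k (le_refl k) hrun.1
      (fun j hj hs _ => hrun.2 j ⟨hj, hs⟩)
  rw [hre]
  by_cases hr0 : rr = 0
  · subst hr0
    have hnone : (PySem.List.pyRange m 0 (-1)).find?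
        (fun i => PySem.List.slice l (some (-i)) none == PySem.List.slice r none (some i))
          = none := by
      rw [List.find?_eq_none]
      intro x hx
      obtain ⟨hx1, hx2⟩ := pv_mem_range_desc hx
      simp only [Bool.not_eq_true]
      rw [show x = ((x.toNat : Nat) : Int) by omega, Bool.eq_false_iff]
      intro hcond
      have hiff := (pv_cond_iff l r x.toNat (by omega) (by omega) (by omega)).mp hcond
      have := hrmax x.toNat (by omega) hiff (by omega)
      omega
    rw [hnone]
    rfl
  · have hqv : (fun i => PySem.List.slice l (some (-i)) none
        == PySem.List.slice r none (some i)) ((rr : Nat) : Int) = true :=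
      (pv_cond_iff l r rr (by omega) (by omega) (by omega)).mpr hrb.2
    have hmaxv : ∀ x ∈ PySem.List.pyRange m 0 (-1),
        (fun i => PySem.List.slice l (some (-i)) none
          == PySem.List.slice r none (some i)) x = true → x ≤ ((rr : Nat) : Int) := by
      intro x hx hcond
      obtain ⟨hx1, hx2⟩ := pv_mem_range_desc hx
      rw [show x = ((x.toNat : Nat) : Int) by omega] at hcond
      have hiff := (pv_cond_iff l r x.toNat (by omega) (by omega) (by omega)).mp hcond
      have := hrmax x.toNat (by omega) hiff (by omega)
      omega
    rw [pv_find_desc _ _ ((rr : Nat) : Int) (pv_range_desc_pairwise m)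
      (pv_range_desc_mem (by omega) (by omega)) hqv hmaxv]

theorem pv_window (h n : List Int) (a : Nat) (hle : a + n.length ≤ h.length) :
    pvInnerA h n (a : Int) = (List.take n.length (List.drop a h) == n) := by
  rw [Bool.eq_iff_iff]
  unfold pvInnerA
  rw [PySem.List.pyRange_zero_nat]
  simp only [List.all_map, List.all_eq_true, List.mem_range, Function.comp]
  constructor
  · intro hall
    rw [beq_iff_eq]
    apply List.ext_getElem
    · simp only [List.length_take, List.length_drop]; omega
    · intro j hj1 hj2
      have hj : j < n.length := hj2
      have hh : a + j < h.length := by omega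
      have hv := hall j hj
      rw [show ((a : Int) + (j : Int)) = ((a + j : Nat) : Int) by push_cast; ring,
        PySem.List.pyGet?_natCast, PySem.List.pyGet?_natCast, beq_iff_eq,
        List.getElem?_eq_getElem hh, List.getElem?_eq_getElem hj] at hv
      simp only [List.getElem_take, List.getElem_drop]
      exact Option.some.inj hv
  · intro heq j hj
    have hE : List.take n.length (List.drop a h) = n := beq_iff_eq.mp heq
    have hh : a + j < h.length := by omega
    rw [show ((a : Int) + (j : Int)) = ((a + j : Nat) : Int) by push_cast; ring,
      PySem.List.pyGet?_natCast, PySem.List.pyGet?_natCast, beq_iff_eq,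
      List.getElem?_eq_getElem hh, List.getElem?_eq_getElem hj, Option.some_inj]
    have h2 := List.getElem_of_eq hE.symm hj
    rw [h2]
    simp [List.getElem_take, List.getElem_drop]

theorem pv_isSubseq_iff_infix (h n : List Int) : is_subsequence h n = true ↔ n <:+: h := by
  unfold is_subsequence
  rw [List.any_eq_true]
  constructor
  · rintro ⟨i, hi, hInner⟩
    obtain ⟨hi0, hilt⟩ := PySem.List.mem_pyRange_one.mp hi
    have hbound : i.toNat + n.length ≤ h.length := by omega
    rw [show i = ((i.toNat : Nat) : Int) by omega, pv_window h n i.toNat hbound,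
      beq_iff_eq] at hInner
    have hpre : n <+: h.drop i.toNat := by
      rw [← hInner]; exact List.take_prefix _ _
    exact hpre.isInfix.trans (List.drop_suffix _ _).isInfix
  · rintro ⟨s, e, rfl⟩
    refine ⟨((s.length : Nat) : Int), PySem.List.mem_pyRange_one.mpr ⟨by omega, by
      simp only [List.length_append]; push_cast; omega⟩, ?_⟩
    rw [pv_window _ n s.length (by simp only [List.length_append]; omega), beq_iff_eq,
      List.append_assoc, List.drop_left, List.take_left]

theorem pv_subseq_eq (h n : List Int) :
    is_subsequence h n = pvContains h n (pvPrefixFn n) := by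
  rw [Bool.eq_iff_iff, pv_isSubseq_iff_infix,
    pv_contains_iff_infix h n (pvPrefixFn n) (pv_goodPi_prefixFn n)]

theorem pv_bne_comm (x y : Int) : (x != y) = (y != x) := by
  rw [Bool.eq_iff_iff]; simp [bne_iff_ne, ne_comm]

theorem pv_row_eq (obs : List (List Int)) (pis : List (List Nat)) (oi : List Int) (i : Int)
    (js : List Int)
    (hpis : ∀ j ∈ js, (PySem.List.pyGet? pis j).getD [] =
      pvPrefixFn ((PySem.List.pyGet? obs j).getD [])) :
    pvRowA obs oi i js = pvRowB obs pis oi (pvPrefixFn oi) i js := by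
  induction js with
  | nil => rfl
  | cons j js ih =>
    simp only [pvRowA, pvRowB]
    rw [pv_bne_comm, ← pv_subseq_eq]
    by_cases hcond : ((j != i) && is_subsequence ((PySem.List.pyGet? obs j).getD []) oi) = true
    · rw [if_pos hcond, if_pos hcond]
    · rw [if_neg hcond, if_neg hcond,
        ih (fun x hx => hpis x (List.mem_cons_of_mem j hx)), hpis j (by simp),
        pv_overlap_eq]

theorem pv_make_overmat_eq (obs : List (List Int)) : make_overmat obs = make_overmat_alt obs := by
  unfold make_overmat make_overmat_alt
  dsimp only
  have hmap : ∀ j : Int, 0 ≤ j → j < (obs.length : Int) →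
      (PySem.List.pyGet? (obs.map pvPrefixFn) j).getD [] =
        pvPrefixFn ((PySem.List.pyGet? obs j).getD []) := by
    intro j hj0 hjlt
    rw [show j = ((j.toNat : Nat) : Int) by omega, PySem.List.pyGet?_natCast,
      PySem.List.pyGet?_natCast, List.getElem?_map]
    have hlt : j.toNat < obs.length := by omega
    rw [List.getElem?_eq_getElem hlt]
    simp
  apply PySem.List.foldl_congr_mem
  intro st i hi
  obtain ⟨hi0, hilt⟩ := PySem.List.mem_pyRange_one.mp hi
  have hjs : ∀ j ∈ PySem.List.pyRange 0 ((obs.length : Int)) 1,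
      (PySem.List.pyGet? (obs.map pvPrefixFn) j).getD [] =
        pvPrefixFn ((PySem.List.pyGet? obs j).getD []) := by
    intro j hj
    obtain ⟨h0, h1⟩ := PySem.List.mem_pyRange_one.mp hj
    exact hmap j h0 h1
  rw [hmap i hi0 hilt,
    ← pv_row_eq obs (obs.map pvPrefixFn) ((PySem.List.pyGet? obs i).getD []) i _ hjs]

-- ===== VERDICT (by name: the statement is the Claim_ definition above) =====
theorem make_overmat_spec : Claim_equal_make_overmat := by
  intro obs _
  unfold Spec_make_overmat
  exact pv_make_overmat_eq obs
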